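-- pv_equiv track=rewrite | github.com/CMS-ETROC/ETROC-Analysis | TestBeam/condor_at_lxplus/merge_feathers.py | get_balanced_sequential_groups
-- ===== SOURCE A (Python) =====
-- def get_balanced_sequential_groups(files, target_size):
--     """
--     Distributes leftovers across the first few groups to maintain
--     uniformity and strict sequential order.
--     """
--     total_files = len(files)
--     if total_files == 0:
--         return []
--     if total_files <= target_size:
--         return [files]
--
--     # Calculate how many groups to create based on the target size
--     num_groups = total_files // target_size
--
--     # Use divmod to get the base size and how many groups need +1 file
--     base_size, remainder = divmod(total_files, num_groups)
--
--     groups = []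
--     start = 0
--     for i in range(num_groups):
--         # The first 'remainder' groups get one extra file
--         current_size = base_size + (1 if i < remainder else 0)
--         groups.append(files[start : start + current_size])
--         start += current_size
--
--     return groups
-- ===== SOURCE B (Python) =====
-- def get_balanced_sequential_groups(files, target_size):
--     total = len(files)
--     if total == 0:
--         return []
--     if total <= target_size:
--         return [files]
--     num_groups = total // target_size
--     base, rem = divmod(total, num_groups)
--
--     # Recursive decomposition: peel the first chunk off the front and recurse
--     # on the remaining suffix, counting the leftover budget down; no index
--     # arithmetic and no running offset into the original list.
--     def go(rest, k, r):
--         if k <= 0: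
--             return []
--         size = base + 1 if r > 0 else base
--         return [rest[:size]] + go(rest[size:], k - 1, r - 1)
--
--     return go(files, num_groups, rem)
-- ===== Notes on version B (the rewrite author's own statement) =====
-- stated objective: alternative
-- what changed: Replaces A's single stateful loop (running start offset slicing into the original list) by structural recursion that destructures the list itself: each call splits off the head chunk and recurses on the shrinking suffix with a countdown of the leftover budget, never computing an index into the original list.
-- outside the precondition, e.g. on get_balanced_sequential_groups([1, 2, 3], 0): A raises ZeroDivisionError, B raises ZeroDivisionError
import Mathlib
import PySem

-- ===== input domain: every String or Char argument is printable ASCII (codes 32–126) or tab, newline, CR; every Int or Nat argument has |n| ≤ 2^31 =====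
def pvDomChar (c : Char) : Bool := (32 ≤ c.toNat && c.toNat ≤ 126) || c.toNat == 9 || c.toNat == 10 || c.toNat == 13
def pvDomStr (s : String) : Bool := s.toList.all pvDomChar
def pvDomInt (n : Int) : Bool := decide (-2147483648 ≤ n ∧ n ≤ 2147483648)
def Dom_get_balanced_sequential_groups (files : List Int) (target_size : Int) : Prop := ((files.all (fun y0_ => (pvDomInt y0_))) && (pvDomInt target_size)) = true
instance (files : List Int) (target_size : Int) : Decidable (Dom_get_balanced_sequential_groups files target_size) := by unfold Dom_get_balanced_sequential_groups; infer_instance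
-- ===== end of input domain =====

-- B replaces A's stateful running-offset slicing loop by structural recursion that
-- splits chunks off the front of the list and recurses on the suffix (objective:
-- alternative decomposition, same cost).

-- ===== PORT A =====
def get_balanced_sequential_groups (files : List Int) (target_size : Int) : List (List Int) :=
  let total_files : Int := files.length
  if total_files = 0 then []
  else if total_files ≤ target_size then [files]
  else
    let num_groups := PySem.Int.floordiv total_files target_size
    let base_size := PySem.Int.floordiv total_files num_groups
    let remainder := PySem.Int.mod total_files num_groups
    -- for i in range(num_groups): append files[start:start+current_size]; start += current_size
    ((PySem.List.pyRange 0 num_groups 1).foldl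
      (fun (s : List (List Int) × Int) i =>
        let current_size := base_size + (if i < remainder then (1 : Int) else 0)
        (s.1 ++ [PySem.List.slice files (some s.2) (some (s.2 + current_size))], s.2 + current_size))
      ([], 0)).1

-- ===== PORT B =====
-- go(rest, k, r): split the head chunk off 'rest' and recurse on the suffix
def pvGo (base : Int) (rest : List Int) (k r : Int) : List (List Int) :=
  if h : k ≤ 0 then []
  else
    let size := if r > 0 then base + 1 else base
    PySem.List.slice rest none (some size)
      :: pvGo base (PySem.List.slice rest (some size) none) (k - 1) (r - 1)
termination_by k.toNat
decreasing_by omega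

def get_balanced_sequential_groups_alt (files : List Int) (target_size : Int) : List (List Int) :=
  let total : Int := files.length
  if total = 0 then []
  else if total ≤ target_size then [files]
  else
    let num_groups := PySem.Int.floordiv total target_size
    let base := PySem.Int.floordiv total num_groups
    let rem := PySem.Int.mod total num_groups
    pvGo base files num_groups rem

-- ===== PRECONDITION & SPEC =====
-- Pre_ excludes only target_size = 0 with a nonempty list longer than the target: there
-- A raises ZeroDivisionError (num_groups = total // 0); B raises there too.
def Pre_get_balanced_sequential_groups (files : List Int) (target_size : Int) : Prop :=
  files = [] ∨ (files.length : Int) ≤ target_size ∨ target_size ≠ 0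
instance (files : List Int) (target_size : Int) : Decidable (Pre_get_balanced_sequential_groups files target_size) := by unfold Pre_get_balanced_sequential_groups; infer_instance
def pvWitness_get_balanced_sequential_groups : List Int × Int := ([1, 2, 3, 4, 5], 2)
def Spec_get_balanced_sequential_groups (files : List Int) (target_size : Int) (out : List (List Int)) : Prop := out = get_balanced_sequential_groups_alt files target_size
instance (files : List Int) (target_size : Int) (out : List (List Int)) : Decidable (Spec_get_balanced_sequential_groups files target_size out) := by unfold Spec_get_balanced_sequential_groups; infer_instance

-- ===== CLAIM (what is proved, stated in full; the proofs are below) =====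
def Claim_equal_get_balanced_sequential_groups : Prop := ∀ (files : List Int) (target_size : Int), Dom_get_balanced_sequential_groups files target_size → Pre_get_balanced_sequential_groups files target_size → Spec_get_balanced_sequential_groups files target_size (get_balanced_sequential_groups files target_size)

-- ===== LEMMAS AND PROOFS =====

-- consecutive boundaries differ by exactly the group size A adds
lemma pv_bound_step (base rem i : Int) :
    (i + 1) * base + min (i + 1) rem
      = (i * base + min i rem) + (base + (if i < rem then (1 : Int) else 0)) := by
  rcases le_or_gt rem i with h | h
  · rw [min_eq_right h, min_eq_right (by omega), if_neg (by omega)]; ring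
  · rw [min_eq_left (by omega), min_eq_left (by omega), if_pos h]; ring

-- A's fold over a consecutive range, started at boundary j, produces the boundary slices
lemma pv_fold_eq (files : List Int) (base rem : Int) :
    ∀ (n : Nat) (j : Int) (acc : List (List Int)),
    ((PySem.List.pyRange j (j + n) 1).foldl
      (fun (s : List (List Int) × Int) i =>
        (s.1 ++ [PySem.List.slice files (some s.2)
                  (some (s.2 + (base + (if i < rem then (1 : Int) else 0))))],
         s.2 + (base + (if i < rem then (1 : Int) else 0))))
      (acc, j * base + min j rem)).1
    = acc ++ (PySem.List.pyRange j (j + n) 1).map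
        (fun i => PySem.List.slice files (some (i * base + min i rem))
                    (some ((i + 1) * base + min (i + 1) rem))) := by
  intro n
  induction n with
  | zero => intro j acc; rw [PySem.List.pyRange_one_eq_nil (by omega : j + ((0:Nat):Int) ≤ j)]; simp
  | succ m ih =>
    intro j acc
    rw [PySem.List.pyRange_one_cons (by push_cast; omega : j < j + ((m + 1 : Nat) : Int))]
    simp only [List.foldl_cons, List.map_cons]
    have hb : j * base + min j rem + (base + (if j < rem then (1 : Int) else 0))
        = (j + 1) * base + min (j + 1) rem := (pv_bound_step base rem j).symm
    have hr : j + ((m + 1 : Nat) : Int) = (j + 1) + (m : Nat) := by push_cast; ring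
    rw [hb, hr, ih (j + 1)]
    simp

-- B's recursion, started on the suffix past boundary j, produces the same boundary slices
lemma pv_go_eq (files : List Int) (base rem : Int) (hbase : 0 ≤ base) (hrem : 0 ≤ rem) :
    ∀ (n : Nat) (j : Int), 0 ≤ j →
    pvGo base (files.drop (j * base + min j rem).toNat) (n : Int) (rem - j)
      = (PySem.List.pyRange j (j + n) 1).map
          (fun i => PySem.List.slice files (some (i * base + min i rem))
                      (some ((i + 1) * base + min (i + 1) rem))) := by
  intro n
  induction n with
  | zero =>
    intro j hj
    rw [PySem.List.pyRange_one_eq_nil (by omega : j + ((0:Nat):Int) ≤ j), pvGo]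
    simp
  | succ m ih =>
    intro j hj
    have hbj : 0 ≤ j * base + min j rem := by
      have := mul_nonneg hj hbase; omega
    have hbj1 : 0 ≤ (j + 1) * base + min (j + 1) rem := by
      have := mul_nonneg (by omega : (0:Int) ≤ j + 1) hbase; omega
    have hstep := pv_bound_step base rem j
    have hsz : 0 ≤ base + (if j < rem then (1:Int) else 0) := by split_ifs <;> omega
    rw [PySem.List.pyRange_one_cons (by push_cast; omega : j < j + ((m + 1 : Nat) : Int)),
        List.map_cons, pvGo]
    rw [dif_neg (by push_cast; omega : ¬ ((m + 1 : Nat) : Int) ≤ 0)]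
    -- the chunk size equals the boundary gap
    have hsize : (if rem - j > 0 then base + 1 else base)
        = base + (if j < rem then (1:Int) else 0) := by
      split_ifs <;> omega
    simp only [hsize]
    congr 1
    · -- head chunk
      rw [PySem.List.slice_to _ hsz,
          PySem.List.slice_toNat _ hbj (by omega)]
      congr 1
      omega
    · -- tail
      rw [PySem.List.slice_from _ hsz, List.drop_drop]
      have harg : (j * base + min j rem).toNat
            + (base + (if j < rem then (1:Int) else 0)).toNat
          = ((j + 1) * base + min (j + 1) rem).toNat := by omega
      have hk : ((m + 1 : Nat) : Int) - 1 = ((m : Nat) : Int) := by push_cast; ring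
      have hr' : rem - j - 1 = rem - (j + 1) := by ring
      rw [harg, hk, hr', ih (j + 1) (by omega)]
      have hj1 : j + ((m + 1 : Nat) : Int) = (j + 1) + ((m : Nat) : Int) := by push_cast; ring
      rw [hj1]

-- ===== VERDICT (by name: the statement is the Claim_ definition above) =====
theorem get_balanced_sequential_groups_spec : Claim_equal_get_balanced_sequential_groups := by
  intro files target_size _ _
  unfold Spec_get_balanced_sequential_groups
  unfold get_balanced_sequential_groups get_balanced_sequential_groups_alt
  by_cases h0 : (files.length : Int) = 0
  · simp [h0]
  · by_cases h1 : (files.length : Int) ≤ target_size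
    · simp [h1]
    · simp only [h0, h1, if_false]
      set ng := PySem.Int.floordiv (files.length : Int) target_size with hng
      set base := PySem.Int.floordiv (files.length : Int) ng with hbase
      set rem := PySem.Int.mod (files.length : Int) ng with hrem
      rcases le_or_gt ng 0 with hle | hpos
      · rw [PySem.List.pyRange_one_eq_nil hle, pvGo]
        simp [hle]
      · have hb0 : 0 ≤ base := by
          rw [hbase, PySem.Int.floordiv_eq_ediv_of_pos hpos]
          exact Int.ediv_nonneg (by omega) (by omega)
        have hr0 : 0 ≤ rem := PySem.Int.mod_nonneg _ hpos
        have hA := pv_fold_eq files base rem ng.toNat 0 []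
        have hB := pv_go_eq files base rem hb0 hr0 ng.toNat 0 le_rfl
        have hcast : (0 : Int) + (ng.toNat : Int) = ng := by omega
        have hngc : ((ng.toNat : Nat) : Int) = ng := by omega
        rw [hcast] at hA hB
        have hrem0 : min (0 : Int) rem = 0 := min_eq_left hr0
        simp only [zero_mul, zero_add, hrem0, sub_zero, Int.toNat_zero, List.drop_zero,
          hngc] at hA hB
        rw [← hB] at hA
        simpa using hA
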